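-- pv_equiv track=rewrite | github.com/wainnyta/kujira | src/services/backtesting.py | _calculate_consecutive_wins
-- ===== SOURCE A (Python) =====
-- from typing import Dict, List, Optional, Tuple
--
-- def _calculate_consecutive_wins(trades: List[Dict]) -> int:
--     """Calculate maximum consecutive winning trades"""
--     max_consecutive = 0
--     current_consecutive = 0
--
--     for trade in trades:
--         if trade.get('pnl', 0) > 0:
--             current_consecutive += 1
--             max_consecutive = max(max_consecutive, current_consecutive)
--         else:
--             current_consecutive = 0
--
--     return max_consecutive
-- ===== SOURCE B (Python) =====
-- from itertools import groupby
-- from typing import Dict, List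
--
-- def _calculate_consecutive_wins(trades: List[Dict]) -> int:
--     """Calculate maximum consecutive winning trades"""
--     wins = [trade.get('pnl', 0) > 0 for trade in trades]
--     return max((len(list(g)) for k, g in groupby(wins) if k), default=0)
-- ===== Notes on version B (the rewrite author's own statement) =====
-- stated objective: idiomatic
-- what changed: Replaces the running current/max accumulator loop with a group-then-reduce pipeline: map trades to win booleans, partition into maximal runs with itertools.groupby, and take the max length of the True runs (default 0).
import Mathlib
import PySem

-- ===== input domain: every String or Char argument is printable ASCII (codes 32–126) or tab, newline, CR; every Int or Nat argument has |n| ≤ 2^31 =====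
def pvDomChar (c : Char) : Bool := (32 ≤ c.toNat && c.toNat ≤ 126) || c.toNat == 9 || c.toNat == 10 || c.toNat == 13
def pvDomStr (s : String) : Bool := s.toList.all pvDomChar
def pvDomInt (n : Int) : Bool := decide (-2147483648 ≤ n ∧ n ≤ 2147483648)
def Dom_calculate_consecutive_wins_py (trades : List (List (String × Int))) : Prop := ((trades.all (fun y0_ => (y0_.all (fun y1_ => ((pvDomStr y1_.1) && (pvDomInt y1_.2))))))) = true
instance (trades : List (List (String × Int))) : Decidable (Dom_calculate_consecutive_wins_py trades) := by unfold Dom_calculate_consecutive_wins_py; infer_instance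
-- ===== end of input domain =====

-- B replaces A's running current/max accumulator with a group-then-reduce pipeline (map to win booleans, group maximal runs, max length of True runs); same return value, idiomatic decomposition.
-- ===== PORT A =====
def calculate_consecutive_wins_py (trades : List (List (String × Int))) : Int :=
  let s := trades.foldl
    (fun (s : Int × Int) trade =>
      if (PySem.Dict.mk trade).getD "pnl" 0 > 0 then
        (max s.1 (s.2 + 1), s.2 + 1)
      else
        (s.1, (0 : Int)))
    ((0 : Int), (0 : Int))
  s.1

-- ===== PORT B =====
-- itertools.groupby: maximal runs of equal elements, left to right (exact)
def pvRunsAux (k : Bool) (n : Nat) : List Bool → List (Bool × Nat)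
  | [] => [(k, n)]
  | b :: rest => if b = k then pvRunsAux k (n + 1) rest else (k, n) :: pvRunsAux b 1 rest

def pvRuns : List Bool → List (Bool × Nat)
  | [] => []
  | b :: rest => pvRunsAux b 1 rest

def calculate_consecutive_wins_py_alt (trades : List (List (String × Int))) : Int :=
  let wins := trades.map (fun trade => decide ((PySem.Dict.mk trade).getD "pnl" 0 > 0))
  -- max(..., default=0) over the lengths of the True groups
  (((pvRuns wins).filter (·.1)).map (fun p => (p.2 : Int))).foldl max 0

-- ===== PRECONDITION & SPEC =====
def Spec_calculate_consecutive_wins_py (trades : List (List (String × Int))) (out : Int) : Prop := out = calculate_consecutive_wins_py_alt trades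
instance (trades : List (List (String × Int))) (out : Int) : Decidable (Spec_calculate_consecutive_wins_py trades out) := by unfold Spec_calculate_consecutive_wins_py; infer_instance

-- ===== CLAIM (what is proved, stated in full; the proofs are below) =====
def Claim_equal_calculate_consecutive_wins_py : Prop := ∀ (trades : List (List (String × Int))), Dom_calculate_consecutive_wins_py trades → Spec_calculate_consecutive_wins_py trades (calculate_consecutive_wins_py trades)

-- ===== LEMMAS AND PROOFS =====

-- the "best run, with the current streak cur feeding the leading run" reference value
def pvR (cur : Int) : List Bool → Int
  | [] => 0
  | true :: t => max (cur + 1) (pvR (cur + 1) t)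
  | false :: t => pvR 0 t

theorem pvR_nonneg (l : List Bool) : ∀ cur : Int, 0 ≤ pvR cur l := by
  induction l with
  | nil => intro cur; simp [pvR]
  | cons b t ih =>
    intro cur
    cases b with
    | true => have := ih (cur + 1); simp only [pvR]; omega
    | false => exact ih 0

def pvStep (s : Int × Int) (b : Bool) : Int × Int :=
  if b then (max s.1 (s.2 + 1), s.2 + 1) else (s.1, 0)

theorem foldl_pvStep (l : List Bool) : ∀ (mx cur : Int), 0 ≤ mx →
    (l.foldl pvStep (mx, cur)).1 = max mx (pvR cur l) := by
  induction l with
  | nil => intro mx cur h; simp [pvR, max_eq_left h]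
  | cons b t ih =>
    intro mx cur h
    cases b with
    | true =>
      have h' : 0 ≤ max mx (cur + 1) := by omega
      simp only [List.foldl_cons, pvStep, if_true]
      rw [ih _ _ h', pvR, max_assoc]
    | false =>
      simp only [List.foldl_cons, pvStep, Bool.false_eq_true, if_false]
      rw [ih _ _ h, pvR]

-- B's max-of-True-run-lengths value for a group list
def pvBest (gs : List (Bool × Nat)) : Int :=
  ((gs.filter (·.1)).map (fun p => (p.2 : Int))).foldl max 0

theorem foldl_max_acc (l : List Int) : ∀ a : Int, 0 ≤ a → l.foldl max a = max a (l.foldl max 0) := by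
  induction l with
  | nil => intro a h; simp [max_eq_left h]
  | cons x t ih =>
    intro a h
    simp only [List.foldl_cons]
    rw [ih _ (by omega), ih (max 0 x) (by omega)]
    omega

theorem foldl_max_nonneg (l : List Int) : 0 ≤ l.foldl max 0 := by
  induction l with
  | nil => simp
  | cons x t ih => simp only [List.foldl_cons]; rw [foldl_max_acc _ _ (by omega)]; omega

theorem pvBest_cons (k : Bool) (n : Nat) (gs : List (Bool × Nat)) :
    pvBest ((k, n) :: gs) = max (if k then (n : Int) else 0) (pvBest gs) := by
  cases k with
  | true =>
    simp only [pvBest, List.filter_cons, if_true, List.map_cons, List.foldl_cons,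
      if_true]
    rw [foldl_max_acc _ _ (by positivity)]
    simp
  | false =>
    simp only [pvBest, List.filter_cons]
    have h := foldl_max_nonneg ((gs.filter (·.1)).map (fun p => (p.2 : Int)))
    simp only [Bool.false_eq_true, if_false]
    omega

theorem pvBest_runsAux (t : List Bool) : ∀ (k : Bool) (n : Nat),
    pvBest (pvRunsAux k n t) =
      max (if k then (n : Int) else 0) (pvR (if k then (n : Int) else 0) t) := by
  induction t with
  | nil =>
    intro k n
    cases k <;> simp [pvRunsAux, pvBest, pvR]
  | cons b rest ih =>
    intro k n
    by_cases hb : b = k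
    · subst hb
      simp only [pvRunsAux, if_true]
      rw [ih b (n + 1)]
      cases b with
      | true =>
        simp only [if_true, pvR]
        have := pvR_nonneg rest ((n : Int) + 1)
        push_cast
        omega
      | false =>
        simp [pvR]
    · simp only [pvRunsAux, if_neg hb]
      rw [pvBest_cons, ih b 1]
      cases k with
      | true =>
        have hb' : b = false := by cases b; rfl; exact absurd rfl hb
        subst hb'
        simp only [if_true, Bool.false_eq_true, if_false, pvR]
        have := pvR_nonneg rest 0
        omega
      | false =>
        have hb' : b = true := by cases b; exact absurd rfl hb; rfl
        subst hb'
        simp only [Bool.false_eq_true, if_false, if_true, pvR, Nat.cast_one, zero_add]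

theorem pvBest_runs (l : List Bool) : pvBest (pvRuns l) = max 0 (pvR 0 l) := by
  cases l with
  | nil => simp [pvRuns, pvBest, pvR]
  | cons b t =>
    simp only [pvRuns]
    rw [pvBest_runsAux t b 1]
    cases b with
    | true =>
      simp only [if_true, pvR, Nat.cast_one, zero_add]
      have := pvR_nonneg t 1
      omega
    | false =>
      simp [pvR]

-- ===== VERDICT (by name: the statement is the Claim_ definition above) =====
theorem calculate_consecutive_wins_py_spec : Claim_equal_calculate_consecutive_wins_py := by
  intro trades _
  unfold Spec_calculate_consecutive_wins_py calculate_consecutive_wins_py calculate_consecutive_wins_py_alt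
  have hfun : (fun (s : Int × Int) trade =>
        if (PySem.Dict.mk trade).getD "pnl" 0 > 0 then (max s.1 (s.2 + 1), s.2 + 1)
        else (s.1, (0 : Int)))
      = (fun (s : Int × Int) (trade : List (String × Int)) =>
          pvStep s (decide ((PySem.Dict.mk trade).getD "pnl" 0 > 0))) := by
    funext s trade
    by_cases h : (PySem.Dict.mk trade).getD "pnl" 0 > 0 <;> simp [pvStep, h]
  have hmf : trades.foldl
      (fun (s : Int × Int) trade => pvStep s (decide ((PySem.Dict.mk trade).getD "pnl" 0 > 0)))
      ((0 : Int), (0 : Int))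
      = (trades.map (fun trade => decide ((PySem.Dict.mk trade).getD "pnl" 0 > 0))).foldl
          pvStep ((0 : Int), (0 : Int)) := by
    rw [List.foldl_map]
  simp only [hfun, hmf]
  rw [foldl_pvStep _ _ _ le_rfl]
  exact (pvBest_runs _).symm
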